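-- pv_equiv track=rewrite | github.com/SoyCarlos/CensusSummer2019 | web_scraper/facilities/facilities/pipelines.py | clean_addresses
-- ===== SOURCE A (Python) =====
-- import string
--
-- def clean_addresses(adds):
--     """Splits up parsed addresses into its parts.
--
--     Arguments:
--         adds {List[List{String}]} -- List of List of Addresses
--
--     Returns:
--         Lists -- Addresses, Cities, and States
--     """
--     addresses = []
--     cities = []
--     states = []
--
--     for address in adds:
--         add = ""
--         state = ""
--         city = ""
--         for element in address:
--             add += element[0] + " "
--             try:
--                 if element[1] == 'StateName':
--                     state = element[0].translate(str.maketrans('', '', string.punctuation))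
--                 elif element[1] == 'PlaceName':
--                     city = element[0].translate(str.maketrans('', '', string.punctuation))
--             except:
--                 pass
--         addresses.append(add)
--         cities.append(city)
--         states.append(state)
--     return addresses, cities, states
-- ===== SOURCE B (Python) =====
-- import string
--
-- _TABLE = str.maketrans('', '', string.punctuation)
--
-- def _last_label(address, label):
--     # first match scanning from the end == last match scanning forward
--     for word, lab in reversed(address):
--         if lab == label:
--             return word.translate(_TABLE)
--     return ''
--
-- def clean_addresses(adds):
--     addresses = [''.join(w + ' ' for w, _ in a) for a in adds]
--     cities = [_last_label(a, 'PlaceName') for a in adds]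
--     states = [_last_label(a, 'StateName') for a in adds]
--     return addresses, cities, states
-- ===== Notes on version B (the rewrite author's own statement) =====
-- stated objective: simpler
-- what changed: Replaces the single nested accumulator loop by three independent comprehension passes; city/state come from a reversed early-return scan for the label instead of last-wins overwriting inside the joint loop.
import Mathlib
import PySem

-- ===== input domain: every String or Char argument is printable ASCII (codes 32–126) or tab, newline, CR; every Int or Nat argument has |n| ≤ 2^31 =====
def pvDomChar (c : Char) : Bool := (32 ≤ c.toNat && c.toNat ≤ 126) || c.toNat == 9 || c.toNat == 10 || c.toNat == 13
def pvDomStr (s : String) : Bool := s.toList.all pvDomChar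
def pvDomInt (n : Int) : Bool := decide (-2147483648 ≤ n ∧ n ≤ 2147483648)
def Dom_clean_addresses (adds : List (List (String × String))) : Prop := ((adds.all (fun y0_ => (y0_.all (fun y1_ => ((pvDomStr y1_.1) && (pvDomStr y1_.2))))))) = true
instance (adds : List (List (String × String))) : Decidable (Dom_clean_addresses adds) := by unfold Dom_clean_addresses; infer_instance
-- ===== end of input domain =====

-- B replaces A's single nested accumulator loop by three independent passes (join; reversed
-- early-return label scans); objective: simpler. Return value only; no mutation involved.

-- string.punctuation
def pvPunct : List Char := "!\"#$%&'()*+,-./:;<=>?@[\\]^_`{|}~".toList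

-- element[0].translate(str.maketrans('', '', string.punctuation)) — exact: deletes exactly those chars
def stripPunct (s : String) : String := String.ofList (s.toList.filter (fun c => !(pvPunct.contains c)))

-- ===== PORT A =====
-- inner 'for element in address' loop; state = (add as chars, state, city)
def cleanA_inner (address : List (String × String)) : List Char × String × String :=
  address.foldl (fun (st : List Char × String × String) e =>
    let add := st.1 ++ e.1.toList ++ [' ']
    if e.2 = "StateName" then (add, stripPunct e.1, st.2.2)
    else if e.2 = "PlaceName" then (add, st.2.1, stripPunct e.1)
    else (add, st.2.1, st.2.2)) ([], "", "")

def clean_addresses (adds : List (List (String × String))) : List String × List String × List String :=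
  adds.foldl (fun (acc : List String × List String × List String) address =>
    let r := cleanA_inner address
    (acc.1 ++ [String.ofList r.1], acc.2.1 ++ [r.2.2], acc.2.2 ++ [r.2.1])) ([], [], [])

-- ===== PORT B =====
-- _last_label: scan reversed(address), return on first label match
def lastLabelRev (label : String) : List (String × String) → String
  | [] => ""
  | e :: rest => if e.2 = label then stripPunct e.1 else lastLabelRev label rest

def lastLabel (address : List (String × String)) (label : String) : String :=
  lastLabelRev label address.reverse

-- ''.join(w + ' ' for w, _ in a)
def joinAddr (a : List (String × String)) : String :=
  String.ofList ((a.map (fun e => e.1.toList ++ [' '])).flatten)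

def clean_addresses_alt (adds : List (List (String × String))) : List String × List String × List String :=
  (adds.map joinAddr,
   adds.map (fun a => lastLabel a "PlaceName"),
   adds.map (fun a => lastLabel a "StateName"))

-- ===== PRECONDITION & SPEC =====
def Spec_clean_addresses (adds : List (List (String × String))) (out : List String × List String × List String) : Prop := out = clean_addresses_alt adds
instance (adds : List (List (String × String))) (out : List String × List String × List String) : Decidable (Spec_clean_addresses adds out) := by unfold Spec_clean_addresses; infer_instance

-- ===== CLAIM (what is proved, stated in full; the proofs are below) =====
def Claim_equal_clean_addresses : Prop := ∀ (adds : List (List (String × String))), Dom_clean_addresses adds → Spec_clean_addresses adds (clean_addresses adds)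

-- ===== LEMMAS AND PROOFS =====

-- lastLabelRev with an explicit default, used to track A's running state/city variables
def lastLabelRevD (label : String) (d : String) : List (String × String) → String
  | [] => d
  | e :: rest => if e.2 = label then stripPunct e.1 else lastLabelRevD label d rest

lemma lastLabelRevD_default_empty (label : String) :
    ∀ xs, lastLabelRevD label "" xs = lastLabelRev label xs := by
  intro xs; induction xs with
  | nil => rfl
  | cons e rest ih => simp [lastLabelRevD, lastLabelRev, ih]

lemma lastLabelRevD_append (label d : String) (xs : List (String × String)) (e : String × String) :
    lastLabelRevD label d (xs ++ [e]) =
      lastLabelRevD label (if e.2 = label then stripPunct e.1 else d) xs := by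
  induction xs with
  | nil => rfl
  | cons x rest ih => simp [lastLabelRevD, ih]

lemma inner_spec (address : List (String × String)) (l : List Char) (s c : String) :
    address.foldl (fun (st : List Char × String × String) e =>
      let add := st.1 ++ e.1.toList ++ [' ']
      if e.2 = "StateName" then (add, stripPunct e.1, st.2.2)
      else if e.2 = "PlaceName" then (add, st.2.1, stripPunct e.1)
      else (add, st.2.1, st.2.2)) (l, s, c) =
    (l ++ (address.map (fun e => e.1.toList ++ [' '])).flatten,
     lastLabelRevD "StateName" s address.reverse,
     lastLabelRevD "PlaceName" c address.reverse) := by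
  induction address generalizing l s c with
  | nil => simp [lastLabelRevD]
  | cons e rest ih =>
    simp only [List.foldl_cons, List.reverse_cons, List.map_cons, List.flatten_cons]
    rw [lastLabelRevD_append, lastLabelRevD_append]
    split_ifs with h1 h2
    · rw [h1] at h2; exact absurd h2 (by decide)
    · rw [ih]; simp [List.append_assoc]
    · rw [ih]; simp [List.append_assoc]
    · rw [ih]; simp [List.append_assoc]

lemma cleanA_inner_spec (address : List (String × String)) :
    cleanA_inner address =
      ((joinAddr address).toList, lastLabel address "StateName", lastLabel address "PlaceName") := by
  unfold cleanA_inner lastLabel joinAddr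
  rw [inner_spec]
  simp [lastLabelRevD_default_empty, String.toList_ofList]

lemma outer_spec (adds : List (List (String × String)))
    (as cs ss : List String) :
    adds.foldl (fun (acc : List String × List String × List String) address =>
      let r := cleanA_inner address
      (acc.1 ++ [String.ofList r.1], acc.2.1 ++ [r.2.2], acc.2.2 ++ [r.2.1])) (as, cs, ss) =
    (as ++ adds.map joinAddr,
     cs ++ adds.map (fun a => lastLabel a "PlaceName"),
     ss ++ adds.map (fun a => lastLabel a "StateName")) := by
  induction adds generalizing as cs ss with
  | nil => simp
  | cons a rest ih =>
    simp only [List.foldl_cons, List.map_cons]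
    rw [cleanA_inner_spec]
    simp [ih, List.append_assoc]

-- ===== VERDICT (by name: the statement is the Claim_ definition above) =====
theorem clean_addresses_spec : Claim_equal_clean_addresses := by
  intro adds _
  show clean_addresses adds = clean_addresses_alt adds
  unfold clean_addresses clean_addresses_alt
  rw [outer_spec]
  simp
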